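-- pv_equiv track=rewrite | github.com/BaoZhuhan/dailycoding | cpp/ICPCtrain/WinterTrain/NewconderGame/20240219/漂亮数组.py | max_beautiful_subarrays
-- ===== SOURCE A (Python) =====
-- def max_beautiful_subarrays(a, k):
--     n = len(a)
--     dp = [0] * (n + 1)
--     for i in range(1, n + 1):
--         dp[i] = dp[i - 1]
--         sum = 0
--         for j in range(i, 0, -1):
--             sum += a[j - 1]
--             if sum % k == 0:
--                 dp[i] = max(dp[i], dp[j - 1] + 1)
--     return dp[n]
-- ===== SOURCE B (Python) =====
-- def max_beautiful_subarrays(a, k):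
--     # One pass: dp over prefixes, best dp value seen per prefix-residue mod k.
--     best = {}
--     s = 0
--     d = 0
--     for x in a:
--         r = s % k
--         if r not in best or best[r] < d:
--             best[r] = d
--         s += x
--         r = s % k
--         if r in best:
--             d = max(d, best[r] + 1)
--     return d
-- ===== Notes on version B (the rewrite author's own statement) =====
-- stated objective: faster
-- what changed: Replaced the O(n^2) double loop that re-sums every subarray ending at each index with a single pass keeping, per prefix-sum residue mod k, the best dp value reached at any earlier prefix.
import Mathlib
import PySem

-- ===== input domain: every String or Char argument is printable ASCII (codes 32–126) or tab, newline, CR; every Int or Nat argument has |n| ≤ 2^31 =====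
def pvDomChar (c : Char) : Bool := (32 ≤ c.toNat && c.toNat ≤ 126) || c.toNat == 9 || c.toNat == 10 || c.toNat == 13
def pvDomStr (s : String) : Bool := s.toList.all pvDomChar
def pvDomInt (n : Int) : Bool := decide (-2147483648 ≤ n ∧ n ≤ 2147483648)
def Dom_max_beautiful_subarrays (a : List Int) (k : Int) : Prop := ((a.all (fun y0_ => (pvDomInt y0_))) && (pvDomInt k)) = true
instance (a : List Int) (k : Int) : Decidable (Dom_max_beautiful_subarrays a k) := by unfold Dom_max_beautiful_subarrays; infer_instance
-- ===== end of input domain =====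

-- B replaces A's O(n²) re-summing double loop by one pass over the array with a
-- best-dp-per-prefix-residue (mod k) table; proved to return the same value for every k ≠ 0
-- (and for the empty list); measured asymptotically faster.


-- ===== PORT A =====
def max_beautiful_subarrays (a : List Int) (k : Int) : Int :=
  let n : Int := a.length
  let dp0 : List Int := List.replicate (a.length + 1) 0
  let dp := (PySem.List.pyRange 1 (n + 1) 1).foldl (fun dp i =>
      let dp := dp.set i.toNat (dp.getD (i - 1).toNat 0)
      let st := (PySem.List.pyRange i 0 (-1)).foldl (fun (st : List Int × Int) j =>
          let sum := st.2 + (PySem.List.pyGet? a (j - 1)).getD 0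
          if PySem.Int.mod sum k = 0 then
            (st.1.set i.toNat (max (st.1.getD i.toNat 0) (st.1.getD (j - 1).toNat 0 + 1)), sum)
          else (st.1, sum)) (dp, 0)
      st.1) dp0
  dp.getD a.length 0

-- ===== PORT B =====
def max_beautiful_subarrays_alt (a : List Int) (k : Int) : Int :=
  let st := a.foldl (fun (st : PySem.Dict Int Int × Int × Int) x =>
      let best := st.1
      let s := st.2.1
      let d := st.2.2
      let r := PySem.Int.mod s k
      let best := match best.get? r with
        | none => best.insert r d
        | some v => if v < d then best.insert r d else best
      let s := s + x
      let r := PySem.Int.mod s k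
      let d := match best.get? r with
        | none => d
        | some v => max d (v + 1)
      (best, s, d)) (PySem.Dict.empty, 0, 0)
  st.2.2

-- ===== PRECONDITION & SPEC =====
-- Pre_ excludes only k = 0 with a nonempty list, where A (and B) raise ZeroDivisionError.
def Pre_max_beautiful_subarrays (a : List Int) (k : Int) : Prop := k ≠ 0 ∨ a = []
instance (a : List Int) (k : Int) : Decidable (Pre_max_beautiful_subarrays a k) := by
  unfold Pre_max_beautiful_subarrays; infer_instance
def pvWitness_max_beautiful_subarrays : List Int × Int := ([2, 1, 3, -3, 4], 3)

def Spec_max_beautiful_subarrays (a : List Int) (k : Int) (out : Int) : Prop := out = max_beautiful_subarrays_alt a k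
instance (a : List Int) (k : Int) (out : Int) : Decidable (Spec_max_beautiful_subarrays a k out) := by
  unfold Spec_max_beautiful_subarrays; infer_instance

-- ===== CLAIM (what is proved, stated in full; the proofs are below) =====
def Claim_equal_max_beautiful_subarrays : Prop := ∀ (a : List Int) (k : Int), Dom_max_beautiful_subarrays a k → Pre_max_beautiful_subarrays a k → Spec_max_beautiful_subarrays a k (max_beautiful_subarrays a k)

-- ===== LEMMAS AND PROOFS =====

-- prefix sum of the first m elements
def pvPref (a : List Int) (m : Nat) : Int := (a.take m).sum

-- the dp recurrence shared by both programs: pvGAux a k i = [dp 0, ..., dp i]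
def pvGAux (a : List Int) (k : Int) : Nat → List Int
  | 0 => [0]
  | i + 1 =>
    let prev := pvGAux a k i
    let gi := prev.getD i 0
    let v := (List.range (i + 1)).foldl
      (fun m j => if PySem.Int.mod (pvPref a (i + 1) - pvPref a j) k = 0 then max m (prev.getD j 0 + 1) else m) gi
    prev ++ [v]

def pvG (a : List Int) (k : Int) (i : Nat) : Int := (pvGAux a k i).getD i 0

theorem pvGAux_length (a : List Int) (k : Int) (i : Nat) : (pvGAux a k i).length = i + 1 := by
  induction i with
  | zero => rfl
  | succ i ih => simp [pvGAux, ih]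

theorem pvGAux_succ (a : List Int) (k : Int) (i : Nat) :
    pvGAux a k (i + 1) = pvGAux a k i ++ [pvG a k (i + 1)] := by
  conv_lhs => rw [pvGAux]
  have : pvG a k (i + 1) = (pvGAux a k (i + 1)).getD (i + 1) 0 := rfl
  rw [this]
  conv_rhs => rw [pvGAux]
  simp [pvGAux_length]

theorem pvGAux_getD (a : List Int) (k : Int) {i j : Nat} (h : j ≤ i) :
    (pvGAux a k i).getD j 0 = pvG a k j := by
  induction i with
  | zero => interval_cases j; rfl
  | succ i ih =>
    rcases Nat.lt_or_ge j (i + 1) with hj | hj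
    · rw [pvGAux_succ, List.getD_append _ _ _ _ (by simp [pvGAux_length]; omega), ih (by omega)]
    · have : j = i + 1 := by omega
      subst this; rfl

theorem pvG_succ (a : List Int) (k : Int) (i : Nat) :
    pvG a k (i + 1) = (List.range (i + 1)).foldl
      (fun m j => if PySem.Int.mod (pvPref a (i + 1) - pvPref a j) k = 0 then max m (pvG a k j + 1) else m)
      (pvG a k i) := by
  have h1 : pvG a k (i + 1) = (pvGAux a k (i + 1)).getD (i + 1) 0 := rfl
  rw [h1]
  conv_lhs => rw [pvGAux]
  rw [List.getD_append_right _ _ _ _ (by simp [pvGAux_length])]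
  simp only [pvGAux_length, Nat.sub_self, List.getD_cons_zero]
  have hgi : (pvGAux a k i).getD i 0 = pvG a k i := rfl
  rw [hgi]
  apply PySem.List.foldl_congr_mem
  intro m j hj
  rw [List.mem_range] at hj
  rw [pvGAux_getD a k (by omega : j ≤ i)]

theorem pvPref_zero (a : List Int) : pvPref a 0 = 0 := rfl

theorem pvPref_succ (a : List Int) {t : Nat} (h : t < a.length) :
    pvPref a (t + 1) = pvPref a t + a.getD t 0 := by
  unfold pvPref
  rw [List.sum_take_succ _ _ h]
  simp [List.getD, List.getElem?_eq_getElem h]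

-- ---------- A side ----------

def pvInnerBody (a : List Int) (k : Int) (i : Int) : (List Int × Int) → Int → (List Int × Int) :=
  fun st j =>
    let sum := st.2 + (PySem.List.pyGet? a (j - 1)).getD 0
    if PySem.Int.mod sum k = 0 then
      (st.1.set i.toNat (max (st.1.getD i.toNat 0) (st.1.getD (j - 1).toNat 0 + 1)), sum)
    else (st.1, sum)

def pvOuterBody (a : List Int) (k : Int) : List Int → Int → List Int :=
  fun dp i =>
    let dp := dp.set i.toNat (dp.getD (i - 1).toNat 0)
    ((PySem.List.pyRange i 0 (-1)).foldl (pvInnerBody a k i) (dp, 0)).1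

theorem A_unfold (a : List Int) (k : Int) :
    max_beautiful_subarrays a k =
      ((PySem.List.pyRange 1 ((a.length : Int) + 1) 1).foldl (pvOuterBody a k)
        (List.replicate (a.length + 1) 0)).getD a.length 0 := rfl

-- the update step of the dp fold, and the descending version A computes
def pvUpd (a : List Int) (k : Int) (m : Nat) : Int → Nat → Int :=
  fun acc j => if PySem.Int.mod (pvPref a m - pvPref a j) k = 0 then max acc (pvG a k j + 1) else acc

def pvD (a : List Int) (k : Int) (m : Nat) : Nat → Int → Int
  | 0, acc => acc
  | t + 1, acc => pvD a k m t (pvUpd a k m acc t)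

theorem pvD_eq_foldl (a : List Int) (k : Int) (m t : Nat) (acc : Int) :
    pvD a k m t acc = ((List.range t).reverse).foldl (pvUpd a k m) acc := by
  induction t generalizing acc with
  | zero => rfl
  | succ t ih =>
    rw [pvD, List.range_succ, List.reverse_append, List.reverse_singleton, List.singleton_append,
      List.foldl_cons, ih]

theorem pvD_g (a : List Int) (k : Int) (i : Nat) :
    pvD a k (i + 1) (i + 1) (pvG a k i) = pvG a k (i + 1) := by
  rw [pvD_eq_foldl, pvG_succ]
  have hperm : (List.range (i + 1)).reverse.Perm (List.range (i + 1)) := List.reverse_perm _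
  rw [hperm.foldl_eq' ?_ (pvG a k i)]
  · rfl
  · intro x _ y _ b
    unfold pvUpd
    split_ifs <;> omega

-- window lemmas: the dp list during outer iteration i+1
theorem win_getD_lt (a : List Int) (k : Int) {i j : Nat} (h : j ≤ i) (acc : Int) (z : List Int) :
    (pvGAux a k i ++ [acc] ++ z).getD j 0 = pvG a k j := by
  rw [List.append_assoc, List.getD_append _ _ _ _ (by rw [pvGAux_length]; omega), pvGAux_getD a k h]

theorem win_getD_eq (a : List Int) (k : Int) (i : Nat) (acc : Int) (z : List Int) :
    (pvGAux a k i ++ [acc] ++ z).getD (i + 1) 0 = acc := by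
  rw [List.append_assoc, List.getD_append_right _ _ _ _ (by rw [pvGAux_length])]
  simp [pvGAux_length]

theorem win_set (a : List Int) (k : Int) (i : Nat) (acc v : Int) (z : List Int) :
    (pvGAux a k i ++ [acc] ++ z).set (i + 1) v = pvGAux a k i ++ [v] ++ z := by
  rw [List.append_assoc, List.set_append, if_neg (by rw [pvGAux_length]; omega), pvGAux_length]
  simp

theorem inner_loop (a : List Int) (k : Int) (i : Nat) (hi : i + 1 ≤ a.length) :
    ∀ t, t ≤ i + 1 → ∀ acc z,
      (PySem.List.pyRange (t : Int) 0 (-1)).foldl (pvInnerBody a k ((i : Int) + 1))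
        (pvGAux a k i ++ [acc] ++ z, pvPref a (i + 1) - pvPref a t)
      = (pvGAux a k i ++ [pvD a k (i + 1) t acc] ++ z, pvPref a (i + 1)) := by
  intro t
  induction t with
  | zero =>
    intro _ acc z
    rw [PySem.List.pyRange_neg_one_eq_nil (by norm_num)]
    simp [pvD, pvPref_zero]
  | succ t ih =>
    intro ht acc z
    have htn : t < a.length := by omega
    have hcast : ((t + 1 : Nat) : Int) = (t : Int) + 1 := by push_cast; ring
    rw [hcast, PySem.List.pyRange_neg_one_cons (by omega), List.foldl_cons]
    have hbody : pvInnerBody a k ((i : Int) + 1)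
        (pvGAux a k i ++ [acc] ++ z, pvPref a (i + 1) - pvPref a (t + 1)) ((t : Int) + 1)
        = (pvGAux a k i ++ [pvUpd a k (i + 1) acc t] ++ z, pvPref a (i + 1) - pvPref a t) := by
      show (let sum := (pvPref a (i + 1) - pvPref a (t + 1)) +
              (PySem.List.pyGet? a ((t : Int) + 1 - 1)).getD 0
            if PySem.Int.mod sum k = 0 then _ else _) = _
      have hg : (PySem.List.pyGet? a ((t : Int) + 1 - 1)).getD 0 = a.getD t 0 := by
        rw [show (t : Int) + 1 - 1 = (t : Int) by ring, PySem.List.pyGet?_natCast]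
        simp [List.getD]
      have hsum : (pvPref a (i + 1) - pvPref a (t + 1)) +
          (PySem.List.pyGet? a ((t : Int) + 1 - 1)).getD 0 = pvPref a (i + 1) - pvPref a t := by
        rw [hg, pvPref_succ a htn]; ring
      simp only [hsum]
      have hti : ((i : Int) + 1).toNat = i + 1 := by omega
      have htt : ((t : Int) + 1 - 1).toNat = t := by omega
      rw [hti, htt]
      unfold pvUpd
      by_cases hc : PySem.Int.mod (pvPref a (i + 1) - pvPref a t) k = 0
      · rw [if_pos hc, if_pos hc, win_getD_eq, win_getD_lt a k (by omega : t ≤ i), win_set]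
      · rw [if_neg hc, if_neg hc]
    rw [hbody, show (t : Int) + 1 - 1 = (t : Int) by ring, ih (by omega), pvD]

theorem outer_loop (a : List Int) (k : Int) :
    ∀ m, m ≤ a.length →
      (PySem.List.pyRange 1 ((m : Int) + 1) 1).foldl (pvOuterBody a k)
        (List.replicate (a.length + 1) 0)
      = pvGAux a k m ++ List.replicate (a.length - m) 0 := by
  intro m
  induction m with
  | zero =>
    intro _
    rw [PySem.List.pyRange_one_eq_nil (by norm_num)]
    show List.replicate (a.length + 1) 0 = _
    rw [List.replicate_succ]
    rfl
  | succ m ih =>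
    intro hm
    have hcast : ((m + 1 : Nat) : Int) = (m : Int) + 1 := by push_cast; ring
    rw [hcast, PySem.List.pyRange_one_succ_right (by omega), List.foldl_append, List.foldl_cons,
      List.foldl_nil, ih (by omega)]
    show (let dp := (pvGAux a k m ++ List.replicate (a.length - m) 0).set ((m : Int) + 1).toNat
            ((pvGAux a k m ++ List.replicate (a.length - m) 0).getD ((m : Int) + 1 - 1).toNat 0)
          ((PySem.List.pyRange ((m : Int) + 1) 0 (-1)).foldl (pvInnerBody a k ((m : Int) + 1)) (dp, 0)).1) = _
    have h1 : ((m : Int) + 1).toNat = m + 1 := by omega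
    have h2 : ((m : Int) + 1 - 1).toNat = m := by omega
    have hget : (pvGAux a k m ++ List.replicate (a.length - m) 0).getD m 0 = pvG a k m := by
      rw [List.getD_append _ _ _ _ (by rw [pvGAux_length]; omega), pvGAux_getD a k le_rfl]
    have hrep : List.replicate (a.length - m) (0 : Int)
        = [0] ++ List.replicate (a.length - (m + 1)) 0 := by
      rw [show a.length - m = (a.length - (m + 1)) + 1 by omega, List.replicate_succ]
      rfl
    rw [h1, h2, hget, hrep, ← List.append_assoc]
    rw [List.set_append, if_pos (by simp [pvGAux_length])]
    have hset : ((pvGAux a k m ++ [(0 : Int)]).set (m + 1) (pvG a k m))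
        = pvGAux a k m ++ [pvG a k m] := by
      rw [List.set_append, if_neg (by rw [pvGAux_length]; omega), pvGAux_length]
      simp
    rw [hset, List.append_assoc, show ((m : Int) + 1) = ((m + 1 : Nat) : Int) by push_cast; ring]
    have hinner := inner_loop a k m hm (m + 1) le_rfl (pvG a k m)
      (List.replicate (a.length - (m + 1)) 0)
    rw [sub_self, ← hcast] at hinner
    rw [← List.append_assoc]
    show (List.foldl (pvInnerBody a k ↑(m + 1))
        (pvGAux a k m ++ [pvG a k m] ++ List.replicate (a.length - (m + 1)) 0, 0)
        (PySem.List.pyRange (↑(m + 1)) 0 (-1))).1 = _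
    rw [hinner, pvD_g, ← pvGAux_succ]

theorem A_eq_g (a : List Int) (k : Int) : max_beautiful_subarrays a k = pvG a k a.length := by
  rw [A_unfold, outer_loop a k a.length le_rfl]
  simp only [Nat.sub_self, List.replicate_zero, List.append_nil]
  exact pvGAux_getD a k le_rfl

-- ---------- B side ----------

def pvBBody (k : Int) : (PySem.Dict Int Int × Int × Int) → Int → (PySem.Dict Int Int × Int × Int) :=
  fun st x =>
    let best := st.1
    let s := st.2.1
    let d := st.2.2
    let r := PySem.Int.mod s k
    let best := match best.get? r with
      | none => best.insert r d
      | some v => if v < d then best.insert r d else best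
    let s := s + x
    let r := PySem.Int.mod s k
    let d := match best.get? r with
      | none => d
      | some v => max d (v + 1)
    (best, s, d)

theorem B_unfold (a : List Int) (k : Int) :
    max_beautiful_subarrays_alt a k = (a.foldl (pvBBody k) (PySem.Dict.empty, 0, 0)).2.2 := rfl

-- Python mod: equal residues iff the difference is divisible (k ≠ 0)
theorem pymod_eq_iff (x y k : Int) (hk : k ≠ 0) :
    PySem.Int.mod x k = PySem.Int.mod y k ↔ PySem.Int.mod (x - y) k = 0 := by
  rw [PySem.Int.mod_eq_zero_iff_dvd]
  have h1 := PySem.Int.floordiv_mul_add_mod x k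
  have h2 := PySem.Int.floordiv_mul_add_mod y k
  constructor
  · intro h
    refine ⟨PySem.Int.floordiv x k - PySem.Int.floordiv y k, ?_⟩
    rw [h] at h1
    ring_nf
    ring_nf at h1 h2
    linarith
  · rintro ⟨c, hc⟩
    have hdvd : k ∣ (PySem.Int.mod x k - PySem.Int.mod y k) := by
      refine ⟨c - PySem.Int.floordiv x k + PySem.Int.floordiv y k, ?_⟩
      ring_nf
      ring_nf at h1 h2 hc
      linarith
    have hb : |PySem.Int.mod x k - PySem.Int.mod y k| < |k| := by
      rcases lt_or_gt_of_ne hk with hneg | hpos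
      · have b1 := PySem.Int.mod_neg_bounds x hneg
        have b2 := PySem.Int.mod_neg_bounds y hneg
        rw [abs_of_neg hneg, abs_lt]
        constructor <;> linarith [b1.1, b1.2, b2.1, b2.2]
      · have b1 := PySem.Int.mod_nonneg x hpos
        have b2 := PySem.Int.mod_nonneg y hpos
        have c1 := PySem.Int.mod_lt x hpos
        have c2 := PySem.Int.mod_lt y hpos
        rw [abs_of_pos hpos, abs_lt]
        constructor <;> linarith
    have := Int.eq_zero_of_abs_lt_dvd ((abs_dvd _ _).mpr hdvd) hb
    linarith

-- the value best stores for residue r after the first i prefixes (prefixes 0..i-1)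
def pvBop (a : List Int) (k : Int) (i : Nat) (r : Int) : Option Int :=
  (List.range i).foldl
    (fun o j => if PySem.Int.mod (pvPref a j) k = r then
        some (match o with | none => pvG a k j | some w => max w (pvG a k j))
      else o) none

theorem pvBop_succ (a : List Int) (k : Int) (i : Nat) (r : Int) :
    pvBop a k (i + 1) r = if PySem.Int.mod (pvPref a i) k = r then
        some (match pvBop a k i r with | none => pvG a k i | some w => max w (pvG a k i))
      else pvBop a k i r := by
  unfold pvBop
  rw [List.range_succ, List.foldl_append, List.foldl_cons, List.foldl_nil]

-- generic: a conditional max-fold equals the max over the selected elements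
theorem maxfold_eq (cond : Nat → Prop) [DecidablePred cond] (f : Nat → Int) (l : List Nat) (acc : Int) :
    l.foldl (fun m j => if cond j then max m (f j + 1) else m) acc
      = (match l.foldl (fun o j => if cond j then
            some (match o with | none => f j | some w => max w (f j)) else o) (none : Option Int) with
        | none => acc
        | some v => max acc (v + 1)) := by
  induction l using List.reverseRecOn generalizing acc with
  | nil => rfl
  | append_singleton l x ih =>
    rw [List.foldl_append, List.foldl_cons, List.foldl_nil,
      List.foldl_append, List.foldl_cons, List.foldl_nil]
    by_cases hc : cond x
    · rw [if_pos hc, if_pos hc, ih]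
      rcases hop : l.foldl (fun o j => if cond j then
          some (match o with | none => f j | some w => max w (f j)) else o) (none : Option Int) with _ | w
      · rw [hop]
      · rw [hop]
        simp only []
        rw [max_assoc]
        have hmx : max (w + 1) (f x + 1) = max w (f x) + 1 := by omega
        rw [hmx]
    · rw [if_neg hc, if_neg hc, ih]

theorem pvG_succ_res (a : List Int) (k : Int) (i : Nat) (hk : k ≠ 0) :
    pvG a k (i + 1) = (match pvBop a k (i + 1) (PySem.Int.mod (pvPref a (i + 1)) k) with
      | none => pvG a k i
      | some v => max (pvG a k i) (v + 1)) := by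
  rw [pvG_succ]
  have hcong : (List.range (i + 1)).foldl
      (fun m j => if PySem.Int.mod (pvPref a (i + 1) - pvPref a j) k = 0 then max m (pvG a k j + 1) else m)
      (pvG a k i)
    = (List.range (i + 1)).foldl
      (fun m j => if PySem.Int.mod (pvPref a j) k = PySem.Int.mod (pvPref a (i + 1)) k
        then max m (pvG a k j + 1) else m) (pvG a k i) := by
    apply PySem.List.foldl_congr_mem
    intro m j _
    by_cases hc : PySem.Int.mod (pvPref a (i + 1) - pvPref a j) k = 0
    · rw [if_pos hc, if_pos (((pymod_eq_iff _ _ _ hk).mpr hc).symm)]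
    · rw [if_neg hc, if_neg (fun h => hc ((pymod_eq_iff _ _ _ hk).mp h.symm))]
  rw [hcong, maxfold_eq]
  have hbop : pvBop a k (i + 1) (PySem.Int.mod (pvPref a (i + 1)) k)
      = (List.range (i + 1)).foldl (fun o j =>
          if PySem.Int.mod (pvPref a j) k = PySem.Int.mod (pvPref a (i + 1)) k then
            some (match o with | none => pvG a k j | some w => max w (pvG a k j)) else o) none := rfl
  rw [← hbop]

theorem B_invariant (a : List Int) (k : Int) (hk : k ≠ 0) :
    ∀ i, i ≤ a.length →
      ∃ best, (a.take i).foldl (pvBBody k) (PySem.Dict.empty, 0, 0)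
          = (best, pvPref a i, pvG a k i)
        ∧ ∀ r, best.get? r = pvBop a k i r := by
  intro i
  induction i with
  | zero =>
    intro _
    refine ⟨PySem.Dict.empty, rfl, fun r => ?_⟩
    simp [pvBop, PySem.Dict.empty, PySem.Dict.get?]
  | succ i ih =>
    intro hi
    obtain ⟨best, hfold, hbest⟩ := ih (by omega)
    have hin : i < a.length := by omega
    rw [List.take_succ, List.getElem?_eq_getElem hin]
    simp only [Option.toList_some, List.foldl_append, List.foldl_cons, List.foldl_nil, hfold]
    have hstep : ∀ r, (match best.get? (PySem.Int.mod (pvPref a i) k) with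
          | none => best.insert (PySem.Int.mod (pvPref a i) k) (pvG a k i)
          | some v => if v < pvG a k i then
              best.insert (PySem.Int.mod (pvPref a i) k) (pvG a k i) else best).get? r
        = pvBop a k (i + 1) r := by
      intro r
      rw [pvBop_succ, ← hbest r]
      by_cases hr : r = PySem.Int.mod (pvPref a i) k
      · subst hr
        rw [if_pos rfl]
        rcases h0 : best.get? (PySem.Int.mod (pvPref a i) k) with _ | v
        · simp [PySem.Dict.get?_insert_self]
        · simp only [h0]
          by_cases hv : v < pvG a k i
          · rw [if_pos hv, PySem.Dict.get?_insert_self]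
            exact congrArg some (max_eq_right (by omega : v ≤ pvG a k i)).symm
          · rw [if_neg hv, h0]
            exact congrArg some (max_eq_left (by omega : pvG a k i ≤ v)).symm
      · rcases h0 : best.get? (PySem.Int.mod (pvPref a i) k) with _ | v
        · simp only [h0]
          rw [PySem.Dict.get?_insert_of_ne best _ hr, if_neg (fun h => hr h.symm)]
        · by_cases hv : v < pvG a k i
          · simp only [h0, if_pos hv]
            rw [PySem.Dict.get?_insert_of_ne best _ hr, if_neg (fun h => hr h.symm)]
          · simp only [h0, if_neg hv]
            rw [if_neg (fun h => hr h.symm)]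
    refine ⟨_, ?_, hstep⟩
    show pvBBody k (best, pvPref a i, pvG a k i) (a[i]) = _
    unfold pvBBody
    simp only []
    have hai : a.getD i 0 = a[i] := by simp [List.getD, List.getElem?_eq_getElem hin]
    have hs : pvPref a i + a[i] = pvPref a (i + 1) := by rw [pvPref_succ a hin, hai]
    rw [hs, hstep (PySem.Int.mod (pvPref a (i + 1)) k), ← pvG_succ_res a k i hk]

theorem B_eq_g (a : List Int) (k : Int) (hk : k ≠ 0) :
    max_beautiful_subarrays_alt a k = pvG a k a.length := by
  rw [B_unfold]
  obtain ⟨best, hfold, -⟩ := B_invariant a k hk a.length le_rfl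
  rw [List.take_length] at hfold
  rw [hfold]

-- ===== VERDICT (by name: the statement is the Claim_ definition above) =====
theorem max_beautiful_subarrays_spec : Claim_equal_max_beautiful_subarrays := by
  intro a k _hdom hpre
  unfold Spec_max_beautiful_subarrays
  rcases hpre with hk | hnil
  · rw [A_eq_g a k, B_eq_g a k hk]
  · subst hnil; rfl
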